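-- pv_equiv track=rewrite | github.com/AniruddhNukal/shiny-waffle | TicTacToe/comp.py | composition_check
-- ===== SOURCE A (Python) =====
-- def composition_check(list):
--     x_count = 0
--     o_count = 0
--     blank_count = 0
--     for i in list:
--         if i == 'X':
--             x_count += 1
--         elif i == 'O':
--             o_count += 1
--         else:
--             blank_count += 1
--     return (x_count, o_count, blank_count)
-- ===== SOURCE B (Python) =====
-- def composition_check(list):
--     x_count = list.count('X')
--     o_count = list.count('O')
--     return (x_count, o_count, len(list) - x_count - o_count)
-- ===== Notes on version B (the rewrite author's own statement) =====
-- stated objective: idiomatic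
-- what changed: Replaces the single branching accumulator loop with two list.count library scans and computes blanks by subtraction from the length instead of an else-branch increment.
import Mathlib
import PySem

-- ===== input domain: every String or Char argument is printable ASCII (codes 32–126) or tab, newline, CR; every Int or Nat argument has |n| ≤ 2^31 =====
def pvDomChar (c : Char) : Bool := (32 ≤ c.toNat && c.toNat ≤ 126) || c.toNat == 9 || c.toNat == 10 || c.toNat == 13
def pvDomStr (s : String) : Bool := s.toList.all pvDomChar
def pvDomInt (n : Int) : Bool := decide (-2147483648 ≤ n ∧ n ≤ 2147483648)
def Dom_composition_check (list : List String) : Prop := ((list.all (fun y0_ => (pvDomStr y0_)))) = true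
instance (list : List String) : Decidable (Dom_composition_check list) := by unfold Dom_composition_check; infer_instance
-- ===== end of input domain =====

-- B re-implements composition_check with two list.count scans plus a length subtraction for blanks (idiomatic decomposition; same O(n) cost).


-- ===== PORT A =====
def composition_check (list : List String) : Int × Int × Int :=
  let st := list.foldl (fun (acc : Int × Int × Int) i =>
    if i == "X" then (acc.1 + 1, acc.2.1, acc.2.2)
    else if i == "O" then (acc.1, acc.2.1 + 1, acc.2.2)
    else (acc.1, acc.2.1, acc.2.2 + 1)) (0, 0, 0)
  (st.1, st.2.1, st.2.2)

-- ===== PORT B =====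
-- B: two PySem.List.count scans, blanks derived by subtraction from the length.
def composition_check_alt (list : List String) : Int × Int × Int :=
  let x_count : Int := PySem.List.count list "X"
  let o_count : Int := PySem.List.count list "O"
  (x_count, o_count, (list.length : Int) - x_count - o_count)

-- ===== PRECONDITION & SPEC =====
def Spec_composition_check (list : List String) (out : Int × Int × Int) : Prop := out = composition_check_alt list
instance (list : List String) (out : Int × Int × Int) : Decidable (Spec_composition_check list out) := by unfold Spec_composition_check; infer_instance

-- ===== CLAIM (what is proved, stated in full; the proofs are below) =====
def Claim_equal_composition_check : Prop := ∀ (list : List String), Dom_composition_check list → Spec_composition_check list (composition_check list)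

-- ===== LEMMAS AND PROOFS =====

-- ===== VERDICT (by name: the statement is the Claim_ definition above) =====
theorem compA_foldl (list : List String) (a b c : Int) :
    list.foldl (fun (acc : Int × Int × Int) i =>
      if i == "X" then (acc.1 + 1, acc.2.1, acc.2.2)
      else if i == "O" then (acc.1, acc.2.1 + 1, acc.2.2)
      else (acc.1, acc.2.1, acc.2.2 + 1)) (a, b, c)
    = (a + (list.count "X" : Int), b + (list.count "O" : Int),
       c + ((list.length : Int) - (list.count "X" : Int) - (list.count "O" : Int))) := by
  induction list generalizing a b c with
  | nil => simp
  | cons h t ih =>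
    rw [List.foldl_cons]
    by_cases hx : h = "X"
    · have hstep : (if (h == "X") = true then ((a, b, c).1 + 1, (a, b, c).2.1, (a, b, c).2.2)
          else if (h == "O") = true then ((a, b, c).1, (a, b, c).2.1 + 1, (a, b, c).2.2)
          else ((a, b, c).1, (a, b, c).2.1, (a, b, c).2.2 + 1)) = ((a : Int) + 1, b, c) := by simp [hx]
      rw [hstep, ih]
      simp [List.count_cons, hx]
      ring_nf
      try exact ⟨trivial, trivial⟩
    by_cases ho : h = "O"
    · have hstep : (if (h == "X") = true then ((a, b, c).1 + 1, (a, b, c).2.1, (a, b, c).2.2)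
          else if (h == "O") = true then ((a, b, c).1, (a, b, c).2.1 + 1, (a, b, c).2.2)
          else ((a, b, c).1, (a, b, c).2.1, (a, b, c).2.2 + 1)) = ((a : Int), b + 1, c) := by simp [hx, ho]
      rw [hstep, ih]
      simp [List.count_cons, hx, ho]
      ring_nf
      try exact ⟨trivial, trivial⟩
    · have hstep : (if (h == "X") = true then ((a, b, c).1 + 1, (a, b, c).2.1, (a, b, c).2.2)
          else if (h == "O") = true then ((a, b, c).1, (a, b, c).2.1 + 1, (a, b, c).2.2)
          else ((a, b, c).1, (a, b, c).2.1, (a, b, c).2.2 + 1)) = ((a : Int), b, c + 1) := by simp [hx, ho]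
      rw [hstep, ih]
      simp [List.count_cons, hx, ho]
      ring_nf
      try exact ⟨trivial, trivial⟩

theorem composition_check_spec : Claim_equal_composition_check := by
  intro list _
  unfold Spec_composition_check composition_check composition_check_alt
  rw [compA_foldl]
  simp [PySem.List.count_eq]
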